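-- pv_equiv track=rewrite | github.com/devGeorgi/Mini-Projects | eminem/eminem.py | map_songs_to_albums
-- ===== SOURCE A (Python) =====
-- def map_songs_to_albums(extracted_songs, albums):
--     album_views = {album: 0 for album in albums.keys()}
--
--     for song_name, view_count in extracted_songs:
--         for album, songs in albums.items():
--             if song_name.lower() in [song.lower() for song in songs]:
--                 album_views[album] += view_count
--                 break
--
--     return album_views
-- ===== SOURCE B (Python) =====
-- def map_songs_to_albums(extracted_songs, albums):
--     song_to_album = {}
--     for album, songs in albums.items():
--         for song in songs:
--             song_to_album.setdefault(song.lower(), album)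
--     album_views = {album: 0 for album in albums}
--     for song_name, view_count in extracted_songs:
--         album = song_to_album.get(song_name.lower())
--         if album is not None:
--             album_views[album] += view_count
--     return album_views
-- ===== Notes on version B (the rewrite author's own statement) =====
-- stated objective: faster
-- what changed: Replaces the per-song scan over all albums (lowercasing every song list each time) by a lowercase song->album dict built once (first album wins, matching A's break), so each song costs one hash lookup.
import Mathlib
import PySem

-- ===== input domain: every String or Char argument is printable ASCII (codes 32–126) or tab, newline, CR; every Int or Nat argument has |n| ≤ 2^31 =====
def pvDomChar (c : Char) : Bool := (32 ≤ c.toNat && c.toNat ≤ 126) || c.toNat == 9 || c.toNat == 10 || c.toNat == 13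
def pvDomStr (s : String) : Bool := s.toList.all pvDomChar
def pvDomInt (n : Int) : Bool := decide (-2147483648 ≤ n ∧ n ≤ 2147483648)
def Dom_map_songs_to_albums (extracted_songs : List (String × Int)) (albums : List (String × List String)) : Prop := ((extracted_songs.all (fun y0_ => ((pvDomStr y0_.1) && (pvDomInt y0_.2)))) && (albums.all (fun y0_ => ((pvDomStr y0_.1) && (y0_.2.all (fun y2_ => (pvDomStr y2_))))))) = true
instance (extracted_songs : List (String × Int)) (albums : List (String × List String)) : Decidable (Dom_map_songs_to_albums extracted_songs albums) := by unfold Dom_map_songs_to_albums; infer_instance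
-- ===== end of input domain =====

-- B builds a lowercase song→album dict once (first album wins, like A's break) instead of
-- rescanning and re-lowercasing every album's song list for every song; return value only.

-- ===== PORT A =====
-- 'albums' is a Python dict; both ports read it through PySem.Dict.ofList (last value wins),
-- exactly as Python's dict does.

-- inner loop of A: first album whose lowercased song list contains song_name.lower() (break)
def pvFindAlbumA (song_name : String) : List (String × List String) → Option String
  | [] => none
  | (album, songs) :: rest =>
    if (songs.map PySem.Str.lower).contains (PySem.Str.lower song_name) then some album
    else pvFindAlbumA song_name rest

def map_songs_to_albums (extracted_songs : List (String × Int)) (albums : List (String × List String)) : List (String × Int) :=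
  let albumsD := PySem.Dict.ofList albums
  let album_views : PySem.Dict String Int :=
    albumsD.keys.foldl (fun d a => d.insert a 0) PySem.Dict.empty
  (extracted_songs.foldl (fun d p =>
    match pvFindAlbumA p.1 albumsD.items with
    | some album => d.modify album 0 (· + p.2)
    | none => d) album_views).items

-- ===== PORT B =====
def map_songs_to_albums_alt (extracted_songs : List (String × Int)) (albums : List (String × List String)) : List (String × Int) :=
  let albumsD := PySem.Dict.ofList albums
  let song_to_album : PySem.Dict String String :=
    albumsD.items.foldl (fun d p =>
      p.2.foldl (fun d s => d.setdefault (PySem.Str.lower s) p.1) d) PySem.Dict.empty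
  let album_views : PySem.Dict String Int :=
    albumsD.keys.foldl (fun d a => d.insert a 0) PySem.Dict.empty
  (extracted_songs.foldl (fun d p =>
    match song_to_album.get? (PySem.Str.lower p.1) with
    | some album => d.modify album 0 (· + p.2)
    | none => d) album_views).items

-- ===== PRECONDITION & SPEC =====
def Spec_map_songs_to_albums (extracted_songs : List (String × Int)) (albums : List (String × List String)) (out : List (String × Int)) : Prop := out = map_songs_to_albums_alt extracted_songs albums
instance (extracted_songs : List (String × Int)) (albums : List (String × List String)) (out : List (String × Int)) : Decidable (Spec_map_songs_to_albums extracted_songs albums out) := by unfold Spec_map_songs_to_albums; infer_instance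

-- ===== CLAIM (what is proved, stated in full; the proofs are below) =====
def Claim_equal_map_songs_to_albums : Prop := ∀ (extracted_songs : List (String × Int)) (albums : List (String × List String)), Dom_map_songs_to_albums extracted_songs albums → Spec_map_songs_to_albums extracted_songs albums (map_songs_to_albums extracted_songs albums)

-- ===== LEMMAS AND PROOFS =====

-- proof-only reformulation of A's inner loop, keyed by the already-lowered name
def pvFirstOwner (k : String) : List (String × List String) → Option String
  | [] => none
  | (album, songs) :: rest =>
    if (songs.map PySem.Str.lower).contains k then some album else pvFirstOwner k rest

-- one album's song list, folded through setdefault: existing entries win, else this album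
theorem pv_get_inner (a k : String) (songs : List String) (d : PySem.Dict String String) :
    ((songs.foldl (fun d s => d.setdefault (PySem.Str.lower s) a) d).get? k)
      = (d.get? k).or (if (songs.map PySem.Str.lower).contains k then some a else none) := by
  induction songs generalizing d with
  | nil => simp
  | cons s rest ih =>
    simp only [List.foldl_cons, ih, List.map_cons, List.contains_cons]
    by_cases hk : k = PySem.Str.lower s
    · subst hk
      rw [PySem.Dict.get?_setdefault_self]
      have : (PySem.Str.lower s == PySem.Str.lower s) = true := by simp
      rw [this]
      cases h : d.get? (PySem.Str.lower s) <;> simp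
    · rw [PySem.Dict.get?_setdefault_of_ne d a hk]
      have hb : (k == PySem.Str.lower s) = false := by simp [hk]
      rw [hb]
      simp

-- the whole song→album dict: lookup of k is the first album owning k
theorem pv_get_s2a (k : String) (L : List (String × List String)) (d : PySem.Dict String String) :
    ((L.foldl (fun d p => p.2.foldl (fun d s => d.setdefault (PySem.Str.lower s) p.1) d) d).get? k)
      = (d.get? k).or (pvFirstOwner k L) := by
  induction L generalizing d with
  | nil => simp [pvFirstOwner]
  | cons p rest ih =>
    simp only [List.foldl_cons, ih, pv_get_inner, pvFirstOwner]
    cases d.get? k <;> cases hc : (p.2.map PySem.Str.lower).contains k <;> simp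

theorem pv_findA_eq_firstOwner (s : String) (L : List (String × List String)) :
    pvFindAlbumA s L = pvFirstOwner (PySem.Str.lower s) L := by
  induction L with
  | nil => rfl
  | cons p rest ih => cases p; simp only [pvFindAlbumA, pvFirstOwner, ih]

-- ===== VERDICT (by name: the statement is the Claim_ definition above) =====
theorem map_songs_to_albums_spec : Claim_equal_map_songs_to_albums := by
  intro es albums _
  show map_songs_to_albums es albums = map_songs_to_albums_alt es albums
  simp only [map_songs_to_albums, map_songs_to_albums_alt]
  have hfun : (fun (d : PySem.Dict String Int) (p : String × Int) =>
        match ((PySem.Dict.ofList albums).items.foldl (fun d q =>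
            q.2.foldl (fun d s => d.setdefault (PySem.Str.lower s) q.1) d)
            PySem.Dict.empty).get? (PySem.Str.lower p.1) with
        | some album => d.modify album 0 (· + p.2)
        | none => d)
      = (fun (d : PySem.Dict String Int) (p : String × Int) =>
        match pvFindAlbumA p.1 (PySem.Dict.ofList albums).items with
        | some album => d.modify album 0 (· + p.2)
        | none => d) := by
    funext d p
    rw [pv_get_s2a, PySem.Dict.get?_empty, Option.none_or, ← pv_findA_eq_firstOwner]
  rw [hfun]
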